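-- pv_equiv track=rewrite | github.com/nirajyt2022-source/edTech | backend/app/services/worksheet_generator.py | ensure_roles
-- ===== SOURCE A (Python) =====
-- VALID_ROLES = {"recognition", "representation", "application", "error_detection", "thinking"}
--
-- TIER_ORDER = {"recognition": 0, "representation": 0, "application": 1, "error_detection": 2, "thinking": 2}
--
-- def ensure_roles(questions: list[dict], difficulty: str) -> list[dict]:
--     """Assign roles if missing, then re-order by tier."""
--     for i, q in enumerate(questions):
--         if q.get("role") not in VALID_ROLES:
--             n = len(questions)
--             pct = i / max(n, 1)
--             if pct < 0.4:
--                 q["role"] = "recognition"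
--             elif pct < 0.8:
--                 q["role"] = "application"
--             else:
--                 q["role"] = "thinking"
--     # Re-order: foundation → application → stretch
--     questions.sort(key=lambda q: TIER_ORDER.get(q.get("role", ""), 1))
--     return questions
-- ===== SOURCE B (Python) =====
-- VALID_ROLES = {"recognition", "representation", "application", "error_detection", "thinking"}
--
-- TIER_ORDER = {"recognition": 0, "representation": 0, "application": 1, "error_detection": 2, "thinking": 2}
--
--
-- def _role_for(i, n):
--     # integer thresholds: i/n < 0.4 iff 5*i < 2*n, i/n < 0.8 iff 5*i < 4*n
--     if 5 * i < 2 * n: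
--         return "recognition"
--     if 5 * i < 4 * n:
--         return "application"
--     return "thinking"
--
--
-- def ensure_roles(questions: list[dict], difficulty: str) -> list[dict]:
--     """Assign roles if missing, then re-order by tier (stable 3-way bucket pass)."""
--     n = len(questions)
--     for i in range(n):
--         q = questions[i]
--         if q.get("role") not in VALID_ROLES:
--             q["role"] = _role_for(i, n)
--     buckets = ([], [], [])
--     for q in questions:
--         buckets[TIER_ORDER.get(q.get("role", ""), 1)].append(q)
--     questions[:] = buckets[0] + buckets[1] + buckets[2]
--     return questions
-- ===== Notes on version B (the rewrite author's own statement) =====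
-- stated objective: alternative
-- what changed: The final stable sort by tier is replaced by a single left-to-right 3-way bucket partition (append each question to its tier's list, then concatenate tier 0/1/2), and the role-assignment loop tests the exact integer thresholds 5*i < 2*n / 5*i < 4*n instead of comparing the float i/max(n,1) with 0.4/0.8.
import Mathlib
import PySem

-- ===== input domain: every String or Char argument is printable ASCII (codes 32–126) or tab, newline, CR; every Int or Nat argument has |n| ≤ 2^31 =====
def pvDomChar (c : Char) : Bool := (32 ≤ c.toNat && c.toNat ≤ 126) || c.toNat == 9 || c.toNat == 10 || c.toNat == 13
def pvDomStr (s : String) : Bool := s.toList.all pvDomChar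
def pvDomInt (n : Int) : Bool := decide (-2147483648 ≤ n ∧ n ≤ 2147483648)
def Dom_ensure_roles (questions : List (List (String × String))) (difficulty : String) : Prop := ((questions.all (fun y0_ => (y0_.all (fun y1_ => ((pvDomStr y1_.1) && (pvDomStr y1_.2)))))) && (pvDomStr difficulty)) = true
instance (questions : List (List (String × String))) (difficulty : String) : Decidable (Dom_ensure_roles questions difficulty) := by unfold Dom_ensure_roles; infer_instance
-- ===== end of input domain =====

-- B replaces the final stable sort by tier with a single left-to-right 3-way bucket partition
-- (alternative algorithm; equivalence is about the RETURN value — in Python both A and B also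
-- mutate the argument list and its dicts in place in the same way).

-- ===== PORT A =====
-- shared module constants of Source A
def VALID_ROLES : PySem.Set String :=
  PySem.Set.ofList ["recognition", "representation", "application", "error_detection", "thinking"]

def TIER_ORDER : PySem.Dict String Int :=
  PySem.Dict.ofList [("recognition", 0), ("representation", 0), ("application", 1), ("error_detection", 2), ("thinking", 2)]

-- q.get("role") in VALID_ROLES (None is never in the set)
def hasValidRole (q : List (String × String)) : Bool :=
  match (PySem.Dict.mk q).get? "role" with
  | some r => VALID_ROLES.contains r
  | none => false

-- q["role"] = v  (dict overwrite in place / append)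
def setRole (q : List (String × String)) (v : String) : List (String × String) :=
  ((PySem.Dict.mk q).insert "role" v).items

-- sort key: TIER_ORDER.get(q.get("role", ""), 1)
def tierKey (q : List (String × String)) : Int :=
  TIER_ORDER.getD ((PySem.Dict.mk q).getD "role" "") 1

def ensure_roles (questions : List (List (String × String))) (difficulty : String) : List (List (String × String)) :=
  -- for i, q in enumerate(questions): assign a default role where missing/invalid.
  -- pct = i / max(n, 1) is a float compared with 0.4 / 0.8; for 0 ≤ i < n ≤ 2^31 the float
  -- comparison agrees exactly with the rational one, ported as 5*i < 2*max(n,1) / 5*i < 4*max(n,1)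
  -- (|i/n − 2/5| ≥ 1/(5n), far above double rounding error).
  let n : Int := questions.length
  let assigned := (PySem.List.enumerate questions).map (fun iq =>
    if hasValidRole iq.2 then iq.2
    else
      if 5 * iq.1 < 2 * (max n 1) then setRole iq.2 "recognition"
      else if 5 * iq.1 < 4 * (max n 1) then setRole iq.2 "application"
      else setRole iq.2 "thinking")
  -- questions.sort(key=lambda q: TIER_ORDER.get(q.get("role", ""), 1))  (stable)
  PySem.List.sorted assigned tierKey false

-- ===== PORT B =====
def roleFor (i n : Int) : String :=
  if 5 * i < 2 * n then "recognition"
  else if 5 * i < 4 * n then "application"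
  else "thinking"

-- for i in range(n): q = questions[i]; if role invalid: q["role"] = _role_for(i, n)
def assignRoles (i n : Int) : List (List (String × String)) → List (List (String × String))
  | [] => []
  | q :: t => (if hasValidRole q then q else setRole q (roleFor i n)) :: assignRoles (i + 1) n t

def ensure_roles_alt (questions : List (List (String × String))) (difficulty : String) : List (List (String × String)) :=
  let n : Int := questions.length
  let qs1 := assignRoles 0 n questions
  -- buckets[TIER_ORDER.get(q.get("role", ""), 1)].append(q), one pass, then concatenate
  let b := qs1.foldl (fun (acc : List (List (String × String)) × List (List (String × String)) × List (List (String × String))) q =>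
      let t := tierKey q
      if t == 0 then (acc.1 ++ [q], acc.2.1, acc.2.2)
      else if t == 1 then (acc.1, acc.2.1 ++ [q], acc.2.2)
      else (acc.1, acc.2.1, acc.2.2 ++ [q]))
    ([], [], [])
  b.1 ++ b.2.1 ++ b.2.2

-- ===== PRECONDITION & SPEC =====
def Spec_ensure_roles (questions : List (List (String × String))) (difficulty : String) (out : List (List (String × String))) : Prop := out = ensure_roles_alt questions difficulty
instance (questions : List (List (String × String))) (difficulty : String) (out : List (List (String × String))) : Decidable (Spec_ensure_roles questions difficulty out) := by unfold Spec_ensure_roles; infer_instance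

-- ===== CLAIM (what is proved, stated in full; the proofs are below) =====
def Claim_equal_ensure_roles : Prop := ∀ (questions : List (List (String × String))) (difficulty : String), Dom_ensure_roles questions difficulty → Spec_ensure_roles questions difficulty (ensure_roles questions difficulty)

-- ===== LEMMAS AND PROOFS =====

-- A's enumerate-map assignment equals B's counter recursion
lemma assign_eq (m : Int) : ∀ (l : List (List (String × String))) (s : Int),
    (PySem.List.enumerate l s).map (fun iq =>
      if hasValidRole iq.2 then iq.2
      else
        if 5 * iq.1 < 2 * m then setRole iq.2 "recognition"
        else if 5 * iq.1 < 4 * m then setRole iq.2 "application"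
        else setRole iq.2 "thinking")
      = assignRoles s m l := by
  intro l
  induction l with
  | nil => intro s; rfl
  | cons q t ih =>
    intro s
    simp only [PySem.List.enumerate_cons, List.map_cons, ih, assignRoles, roleFor]
    by_cases hv : hasValidRole q
    · simp [hv]
    · by_cases h2 : 5 * s < 2 * m
      · simp [hv, h2]
      · by_cases h4 : 5 * s < 4 * m <;> simp [hv, h2, h4]

lemma TIER_ORDER_mk : TIER_ORDER = PySem.Dict.mk
    [("recognition", 0), ("representation", 0), ("application", 1), ("error_detection", 2), ("thinking", 2)] := by
  rfl

-- the tier key always lies in {0, 1, 2}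
lemma tierKey_range (q : List (String × String)) :
    tierKey q = 0 ∨ tierKey q = 1 ∨ tierKey q = 2 := by
  unfold tierKey
  generalize (PySem.Dict.mk q).getD "role" "" = s
  rw [TIER_ORDER_mk]
  simp only [PySem.Dict.getD, PySem.Dict.get?_mk_cons]
  split_ifs <;> simp [PySem.Dict.get?]

lemma insertBy_skip_block {α : Type} (key : α → Int) (a : α) (l t : List α)
    (h : ∀ y ∈ l, ¬ key a < key y) :
    PySem.List.insertBy (fun p q => decide (key p < key q)) a (l ++ t)
      = l ++ PySem.List.insertBy (fun p q => decide (key p < key q)) a t := by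
  induction l with
  | nil => rfl
  | cons y ys ih =>
    have hy : ¬ key a < key y := h y (by simp)
    simp only [List.cons_append, PySem.List.insertBy, decide_eq_true_eq]
    rw [if_neg hy, ih (fun z hz => h z (by simp [hz]))]

lemma insertBy_front {α : Type} (key : α → Int) (a : α) (l : List α)
    (h : ∀ y ∈ l, key a < key y) :
    PySem.List.insertBy (fun p q => decide (key p < key q)) a l = a :: l := by
  cases l with
  | nil => rfl
  | cons y ys =>
    simp only [PySem.List.insertBy, decide_eq_true_eq]
    rw [if_pos (h y (by simp))]

lemma insertBy_last {α : Type} (key : α → Int) (a : α) (l : List α)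
    (h : ∀ y ∈ l, ¬ key a < key y) :
    PySem.List.insertBy (fun p q => decide (key p < key q)) a l = l ++ [a] := by
  induction l with
  | nil => rfl
  | cons y ys ih =>
    have hy : ¬ key a < key y := h y (by simp)
    simp only [PySem.List.insertBy, decide_eq_true_eq]
    rw [if_neg hy, ih (fun z hz => h z (by simp [hz]))]
    rfl

lemma mem_filter_key {α : Type} {l : List α} {key : α → Int} {c : Int} {x : α}
    (hx : x ∈ l.filter (fun y => key y == c)) : key x = c := by
  simp only [List.mem_filter, beq_iff_eq] at hx
  exact hx.2

-- stable sort by a {0,1,2}-valued key is the 3-way partition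
lemma sorted3 {α : Type} (l : List α) (key : α → Int)
    (h : ∀ x ∈ l, key x = 0 ∨ key x = 1 ∨ key x = 2) :
    PySem.List.sorted l key false
      = l.filter (fun x => key x == 0) ++ l.filter (fun x => key x == 1) ++ l.filter (fun x => key x == 2) := by
  rw [PySem.List.sorted_eq_foldl_insertBy]
  induction l using List.reverseRecOn with
  | nil => rfl
  | append_singleton t a ih =>
    have ht : ∀ x ∈ t, key x = 0 ∨ key x = 1 ∨ key x = 2 := fun x hx => h x (by simp [hx])
    rw [List.foldl_append, List.foldl_cons, List.foldl_nil, ih ht]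
    have ha := h a (by simp)
    simp only [List.filter_append, List.filter_cons, List.filter_nil]
    rcases ha with h0 | h1 | h2
    · rw [List.append_assoc,
        insertBy_skip_block key a (t.filter (fun x => key x == 0)) _
          (fun y hy => by have := mem_filter_key hy; omega),
        insertBy_front key a _ (fun y hy => by
          rcases List.mem_append.mp hy with hy | hy <;> (have := mem_filter_key hy; omega))]
      simp [h0]
    · rw [insertBy_skip_block key a (t.filter (fun x => key x == 0) ++ t.filter (fun x => key x == 1))
          (t.filter (fun x => key x == 2)) (fun y hy => by
            rcases List.mem_append.mp hy with hy | hy <;> (have := mem_filter_key hy; omega)),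
        insertBy_front key a _ (fun y hy => by have := mem_filter_key hy; omega)]
      simp [h1]
    · rw [insertBy_last key a _ (fun y hy => by
        rcases List.mem_append.mp hy with hy | hy
        · rcases List.mem_append.mp hy with hy | hy <;> (have := mem_filter_key hy; omega)
        · have := mem_filter_key hy; omega)]
      simp [h2]

-- the bucket fold computes the three filters
lemma fold3 (l : List (List (String × String))) :
    ∀ (a b c : List (List (String × String))),
    l.foldl (fun (acc : List (List (String × String)) × List (List (String × String)) × List (List (String × String))) q =>
      let t := tierKey q
      if t == 0 then (acc.1 ++ [q], acc.2.1, acc.2.2)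
      else if t == 1 then (acc.1, acc.2.1 ++ [q], acc.2.2)
      else (acc.1, acc.2.1, acc.2.2 ++ [q])) (a, b, c)
    = (a ++ l.filter (fun q => tierKey q == 0),
       b ++ l.filter (fun q => tierKey q == 1),
       c ++ l.filter (fun q => !(tierKey q == 0) && !(tierKey q == 1))) := by
  induction l with
  | nil => intro a b c; simp
  | cons q t ih =>
    intro a b c
    rw [List.foldl_cons]
    by_cases h0 : tierKey q = 0
    · have hstep : (let tk := tierKey q
        if tk == 0 then (a ++ [q], b, c)
        else if tk == 1 then (a, b ++ [q], c)
        else (a, b, c ++ [q])) = (a ++ [q], b, c) := by simp [h0]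
      rw [hstep, ih]
      simp [h0]
    · by_cases h1 : tierKey q = 1
      · have hstep : (let tk := tierKey q
          if tk == 0 then (a ++ [q], b, c)
          else if tk == 1 then (a, b ++ [q], c)
          else (a, b, c ++ [q])) = (a, b ++ [q], c) := by simp [h0, h1]
        rw [hstep, ih]
        simp [h1]
      · have hstep : (let tk := tierKey q
          if tk == 0 then (a ++ [q], b, c)
          else if tk == 1 then (a, b ++ [q], c)
          else (a, b, c ++ [q])) = (a, b, c ++ [q]) := by simp [h0, h1]
        rw [hstep, ih]
        simp [h0, h1]


lemma third_filter (l : List (List (String × String)))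
    (h : ∀ x ∈ l, tierKey x = 0 ∨ tierKey x = 1 ∨ tierKey x = 2) :
    l.filter (fun q => !(tierKey q == 0) && !(tierKey q == 1)) = l.filter (fun q => tierKey q == 2) := by
  apply List.filter_congr
  intro x hx
  rcases h x hx with h' | h' | h' <;> simp [h']

-- ===== VERDICT (by name: the statement is the Claim_ definition above) =====
theorem ensure_roles_spec : Claim_equal_ensure_roles := by
  intro questions difficulty _
  unfold Spec_ensure_roles
  simp only [ensure_roles, ensure_roles_alt]
  cases questions with
  | nil => rfl
  | cons q0 qt =>
    have hmax : max ((q0 :: qt).length : Int) 1 = ((q0 :: qt).length : Int) := by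
      have h1 : (1 : Int) ≤ ((q0 :: qt).length : Int) := by
        simp [List.length_cons]
      omega
    rw [hmax, assign_eq]
    set l := assignRoles 0 ((q0 :: qt).length : Int) (q0 :: qt) with hl
    have hr : ∀ x ∈ l, tierKey x = 0 ∨ tierKey x = 1 ∨ tierKey x = 2 := fun x _ => tierKey_range x
    rw [fold3 l [] [] [], third_filter l hr]
    simpa using sorted3 l tierKey hr
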